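-- pv_equiv track=rewrite | github.com/Julinho-CD/case-datarisk | app/analysis.py | infer_base_feature
-- ===== SOURCE A (Python) =====
-- def infer_base_feature(raw_feature: str, candidate_features: list[str]) -> str | None:
--     cleaned = str(raw_feature).replace("num__", "").replace("cat__", "")
--     if cleaned in candidate_features:
--         return cleaned
--     for base in sorted(candidate_features, key=len, reverse=True):
--         if cleaned.startswith(f"{base}_") or cleaned == base:
--             return base
--     return None
-- ===== SOURCE B (Python) =====
-- def infer_base_feature(raw_feature: str, candidate_features: list[str]) -> str | None:
--     cleaned = str(raw_feature).replace("num__", "").replace("cat__", "")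
--     best = None
--     for base in candidate_features:
--         if cleaned == base or cleaned.startswith(base + "_"):
--             if best is None or len(base) > len(best):
--                 best = base
--     return best
-- ===== Notes on version B (the rewrite author's own statement) =====
-- stated objective: simpler
-- what changed: Replaces the membership pre-check plus stable sort by descending length and scan with a single linear pass that keeps the longest matching candidate (strict > preserves the first among equal-length ties).
import Mathlib
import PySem

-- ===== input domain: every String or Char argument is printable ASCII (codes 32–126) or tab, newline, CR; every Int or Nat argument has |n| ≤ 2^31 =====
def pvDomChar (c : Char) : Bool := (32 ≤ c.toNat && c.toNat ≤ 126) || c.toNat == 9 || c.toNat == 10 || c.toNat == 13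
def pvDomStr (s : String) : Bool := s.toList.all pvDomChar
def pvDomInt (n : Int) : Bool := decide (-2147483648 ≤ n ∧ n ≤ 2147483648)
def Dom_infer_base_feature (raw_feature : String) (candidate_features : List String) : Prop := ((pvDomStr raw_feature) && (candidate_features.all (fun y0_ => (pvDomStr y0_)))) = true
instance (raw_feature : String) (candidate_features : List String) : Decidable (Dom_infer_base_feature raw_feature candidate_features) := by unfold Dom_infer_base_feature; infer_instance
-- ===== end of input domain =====

-- B replaces A's sort-by-descending-length-then-scan with one linear pass keeping the
-- longest matching candidate (strict > keeps the first among equal lengths): simpler, same value.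

-- ===== PORT A =====
def infer_base_feature (raw_feature : String) (candidate_features : List String) : Option String :=
  let cleaned := PySem.Str.replace (PySem.Str.replace raw_feature "num__" "") "cat__" ""
  if candidate_features.contains cleaned then
    some cleaned
  else
    List.find? (fun base => PySem.Str.startswith cleaned (base ++ "_") || cleaned == base)
      (PySem.List.sorted candidate_features (fun s => PySem.Str.len s) true)

-- ===== PORT B =====
def infer_base_feature_alt (raw_feature : String) (candidate_features : List String) : Option String :=
  let cleaned := PySem.Str.replace (PySem.Str.replace raw_feature "num__" "") "cat__" ""
  candidate_features.foldl (fun best base =>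
    if cleaned == base || PySem.Str.startswith cleaned (base ++ "_") then
      match best with
      | none => some base
      | some b => if PySem.Str.len b < PySem.Str.len base then some base else some b
    else best) none

-- ===== PRECONDITION & SPEC =====
def Spec_infer_base_feature (raw_feature : String) (candidate_features : List String) (out : Option String) : Prop := out = infer_base_feature_alt raw_feature candidate_features
instance (raw_feature : String) (candidate_features : List String) (out : Option String) : Decidable (Spec_infer_base_feature raw_feature candidate_features out) := by unfold Spec_infer_base_feature; infer_instance

-- ===== CLAIM (what is proved, stated in full; the proofs are below) =====
def Claim_equal_infer_base_feature : Prop := ∀ (raw_feature : String) (candidate_features : List String), Dom_infer_base_feature raw_feature candidate_features → Spec_infer_base_feature raw_feature candidate_features (infer_base_feature raw_feature candidate_features)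

-- ===== LEMMAS AND PROOFS =====

-- B's loop step, abstracted over the match predicate p and the length key.
def bstep {α : Type} (key : α → Int) (p : α → Bool) (best : Option α) (x : α) : Option α :=
  if p x then
    match best with
    | none => some x
    | some b => if key b < key x then some x else some b
  else best

-- Inserting x into a key-descending list commutes find? with B's step.
theorem find?_insertBy {α : Type} (key : α → Int) (p : α → Bool) (x : α) (s : List α)
    (hs : s.Pairwise (fun a b => key b ≤ key a)) :
    (PySem.List.insertBy (fun a b => decide (key b < key a)) x s).find? p
      = bstep key p (s.find? p) x := by
  induction s with
  | nil =>
    cases hpx : p x <;> simp [PySem.List.insertBy, bstep, hpx]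
  | cons y ys ih =>
    have hpair := List.pairwise_cons.mp hs
    by_cases hxy : key y < key x
    · -- x goes in front
      simp only [PySem.List.insertBy, hxy, decide_true, if_true]
      cases hpx : p x with
      | false => simp [bstep, hpx]
      | true =>
        rcases hfy : List.find? p (y :: ys) with _ | z
        · simp [bstep, hpx]
        · have hz : z ∈ y :: ys := List.mem_of_find?_eq_some hfy
          have hzy : key z ≤ key y := by
            rcases List.mem_cons.mp hz with rfl | hmem
            · exact le_refl _
            · exact hpair.1 z hmem
          have hzx : key z < key x := lt_of_le_of_lt hzy hxy
          simp [bstep, hpx, hzx]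
    · -- x goes after y
      simp only [PySem.List.insertBy, hxy, decide_false, Bool.false_eq_true, if_false]
      cases hpy : p y with
      | true =>
        rw [List.find?_cons_of_pos hpy, List.find?_cons_of_pos hpy]
        cases hpx : p x <;> simp [bstep, hpx, hxy]
      | false =>
        rw [List.find?_cons_of_neg (by simp [hpy]), List.find?_cons_of_neg (by simp [hpy])]
        exact ih hpair.2

-- find? over A's stable descending sort equals B's fold.
theorem find?_sorted_rev {α : Type} (key : α → Int) (p : α → Bool) (l : List α) :
    (PySem.List.sorted l key true).find? p = l.foldl (bstep key p) none := by
  induction l using List.reverseRecOn with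
  | nil => simp [PySem.List.sorted]
  | append_singleton l x ih =>
    have h1 : PySem.List.sorted (l ++ [x]) key true
        = PySem.List.insertBy (fun a b => decide (key b < key a)) x
            (PySem.List.sorted l key true) := by
      rw [PySem.List.sorted_rev_eq_foldl_insertBy, PySem.List.sorted_rev_eq_foldl_insertBy,
        List.foldl_append]
      simp
    rw [h1, find?_insertBy key p x _ (PySem.List.sorted_pairwise_rev l key), ih,
      List.foldl_append]
    simp

-- If c itself occurs in the list and every p-match is c or strictly shorter, B's fold yields c.
theorem foldl_bstep_of_mem {α : Type} (key : α → Int) (p : α → Bool) (c : α)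
    (hpc : p c = true) (hp : ∀ x, p x = true → x = c ∨ key x < key c) :
    ∀ (l : List α) (o : Option α),
      (o = none ∨ o = some c ∨ ∃ a, o = some a ∧ key a < key c) →
      (c ∈ l ∨ o = some c) →
      l.foldl (bstep key p) o = some c := by
  have hA : ∀ o, (o = none ∨ o = some c ∨ ∃ a, o = some a ∧ key a < key c) →
      bstep key p o c = some c := by
    intro o hI
    rcases hI with rfl | rfl | ⟨a, rfl, ha⟩
    · simp [bstep, hpc]
    · simp [bstep, hpc]
    · simp [bstep, hpc, ha]
  have hB : ∀ x, bstep key p (some c) x = some c := by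
    intro x
    by_cases hpx : p x = true
    · rcases hp x hpx with rfl | hlt
      · simp [bstep, hpx]
      · simp [bstep, hpx, not_lt.mpr (le_of_lt hlt)]
    · simp [bstep, hpx]
  intro l
  induction l with
  | nil =>
    intro o hI hm
    rcases hm with hm | hm
    · simp at hm
    · simpa using hm
  | cons x t ih =>
    intro o hI hm
    simp only [List.foldl_cons]
    apply ih
    · by_cases hpx : p x = true
      · rcases hp x hpx with rfl | hlt
        · right; left; exact hA o hI
        · rcases hI with rfl | rfl | ⟨a, rfl, ha⟩
          · right; right; exact ⟨x, by simp [bstep, hpx], hlt⟩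
          · right; left; exact hB x
          · by_cases hax : key a < key x
            · right; right; exact ⟨x, by simp [bstep, hpx, hax], hlt⟩
            · right; right; exact ⟨a, by simp [bstep, hpx, hax], ha⟩
      · rcases hI with rfl | rfl | ⟨a, rfl, ha⟩
        · left; simp [bstep, hpx]
        · right; left; simp [bstep, hpx]
        · right; right; exact ⟨a, by simp [bstep, hpx], ha⟩
    · rcases hm with hm | hm
      · rcases List.mem_cons.mp hm with rfl | hmt
        · right; exact hA o hI
        · left; exact hmt
      · right; rw [hm]; exact hB x

-- Both ports, with the shared cleaned string abstracted out.
theorem infer_base_feature_main (cleaned : String) (cands : List String) :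
    (if cands.contains cleaned then some cleaned
     else List.find? (fun base => PySem.Str.startswith cleaned (base ++ "_") || cleaned == base)
       (PySem.List.sorted cands (fun s => PySem.Str.len s) true))
    = cands.foldl (fun best base =>
        if cleaned == base || PySem.Str.startswith cleaned (base ++ "_") then
          match best with
          | none => some base
          | some b => if PySem.Str.len b < PySem.Str.len base then some base else some b
        else best) none := by
  have hfold : (fun (best : Option String) (base : String) =>
        if cleaned == base || PySem.Str.startswith cleaned (base ++ "_") then
          match best with
          | none => some base
          | some b => if PySem.Str.len b < PySem.Str.len base then some base else some b
        else best)
      = bstep (fun s => PySem.Str.len s)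
          (fun base => cleaned == base || PySem.Str.startswith cleaned (base ++ "_")) := by
    funext best base
    cases best <;> rfl
  rw [hfold]
  have hkey : ∀ x : String,
      (cleaned == x || PySem.Str.startswith cleaned (x ++ "_")) = true →
      x = cleaned ∨ PySem.Str.len x < PySem.Str.len cleaned := by
    intro x hx
    simp only [Bool.or_eq_true, beq_iff_eq] at hx
    rcases hx with hx | hx
    · exact Or.inl hx.symm
    · right
      have hpre : (x ++ "_").toList <+: cleaned.toList := by
        rw [← PySem.Chars.startswith_iff]
        simpa using hx
      have hlen := hpre.length_le
      simp [String.toList_append] at hlen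
      have e1 : x.toList.length = x.length := String.length_toList ▸ rfl
      have e2 : cleaned.toList.length = cleaned.length := String.length_toList ▸ rfl
      simp only [PySem.Str.len_eq]
      omega
  have hpc : (cleaned == cleaned || PySem.Str.startswith cleaned (cleaned ++ "_")) = true := by
    simp
  by_cases hm : cands.contains cleaned
  · simp only [hm, if_true]
    exact (foldl_bstep_of_mem _ _ cleaned hpc hkey cands none (Or.inl rfl)
      (Or.inl (by simpa using hm))).symm
  · have hp' : (fun base => PySem.Str.startswith cleaned (base ++ "_") || cleaned == base)
        = (fun base => cleaned == base || PySem.Str.startswith cleaned (base ++ "_")) := by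
      funext b; exact Bool.or_comm _ _
    simp only [hm, Bool.false_eq_true, if_false]
    rw [hp', find?_sorted_rev]

-- ===== VERDICT (by name: the statement is the Claim_ definition above) =====
theorem infer_base_feature_spec : Claim_equal_infer_base_feature := by
  intro raw cands _
  unfold Spec_infer_base_feature infer_base_feature infer_base_feature_alt
  exact infer_base_feature_main (PySem.Str.replace (PySem.Str.replace raw "num__" "") "cat__" "") cands
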